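-- pv_equiv track=rewrite | github.com/rubelw/OSSS | src/OSSS/ai/agents/final/agent.py | _extract_refined_question_from_refiner
-- ===== SOURCE A (Python) =====
-- def _extract_refined_question_from_refiner(refiner_text: str) -> str:
--     if not isinstance(refiner_text, str) or not refiner_text.strip():
--         return ""
--
--     lines = [ln.strip() for ln in refiner_text.splitlines() if ln.strip()]
--     if not lines:
--         return ""
--
--     for ln in lines:
--         low = ln.lower()
--         if low.startswith("**improved query**") or low.startswith("improved query:"):
--             if ":" in ln:
--                 return ln.split(":", 1)[1].strip()
--
--     for ln in lines:
--         low = ln.lower()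
--         if low.startswith("refined query:"):
--             return ln.split(":", 1)[1].strip()
--
--     question_candidates = [ln for ln in lines if "?" in ln]
--     if question_candidates:
--         return question_candidates[-1].strip()
--
--     return ""
-- ===== SOURCE B (Python) =====
-- def _extract_refined_question_from_refiner(refiner_text: str) -> str:
--     if not isinstance(refiner_text, str) or not refiner_text.strip():
--         return ""
--
--     improved = refined = question = None
--     for raw in refiner_text.splitlines():
--         ln = raw.strip()
--         if not ln:
--             continue
--         low = ln.lower()
--         if improved is None and (low.startswith("**improved query**")
--                                  or low.startswith("improved query:")) and ":" in ln:
--             improved = ln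
--         if refined is None and low.startswith("refined query:"):
--             refined = ln
--         if "?" in ln:
--             question = ln
--
--     if improved is not None:
--         return improved.split(":", 1)[1].strip()
--     if refined is not None:
--         return refined.split(":", 1)[1].strip()
--     if question is not None:
--         return question
--     return ""
-- ===== Notes on version B (the rewrite author's own statement) =====
-- stated objective: alternative
-- what changed: A builds a cleaned line list and scans it three times (improved-query loop, refined-query loop, question-candidate filter); B makes a single pass over the raw lines maintaining three accumulators (first improved-query line with ':', first refined-query line, last line containing '?') and picks the answer afterwards.
import Mathlib
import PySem

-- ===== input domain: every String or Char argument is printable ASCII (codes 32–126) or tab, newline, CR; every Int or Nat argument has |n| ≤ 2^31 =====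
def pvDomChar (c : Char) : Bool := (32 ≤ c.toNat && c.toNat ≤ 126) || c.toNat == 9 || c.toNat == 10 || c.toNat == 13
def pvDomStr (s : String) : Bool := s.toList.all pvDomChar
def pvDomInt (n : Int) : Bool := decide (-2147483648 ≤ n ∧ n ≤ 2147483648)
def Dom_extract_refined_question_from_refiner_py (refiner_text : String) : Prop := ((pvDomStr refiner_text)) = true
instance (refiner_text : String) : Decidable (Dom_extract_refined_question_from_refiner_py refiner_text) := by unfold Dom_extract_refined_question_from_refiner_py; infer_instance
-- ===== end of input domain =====

-- B replaces A's three separate scans over the cleaned lines by one pass that keeps the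
-- first improved-query match, the first refined-query match and the last question line
-- (objective: alternative decomposition, same asymptotic cost).


-- ===== PORT A =====
-- shared vocabulary of both Pythons (the literal prefix tests and the split-extract idiom)
def pvLowC (ln : List Char) : List Char := PySem.Chars.lower ln

def pvImpPrefix (low : List Char) : Bool :=
  PySem.Chars.startswith low "**improved query**".toList || PySem.Chars.startswith low "improved query:".toList

def pvRefPrefix (low : List Char) : Bool := PySem.Chars.startswith low "refined query:".toList

-- ln.split(":", 1)[1].strip(); exact whenever ':' occurs in ln (both Pythons only evaluate it then;
-- Python would raise IndexError otherwise, a case neither program reaches)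
def pvAfterColon (ln : List Char) : List Char :=
  PySem.Chars.strip ((PySem.List.pyGet? (PySem.Chars.splitOnMax ln [':'] 1) 1).getD [])

-- first for-loop of A: return on the first improved-query line that contains ':'
def pvALoop1 : List (List Char) → Option (List Char)
  | [] => none
  | ln :: rest =>
    if pvImpPrefix (pvLowC ln) then
      if PySem.Chars.isIn [':'] ln then some (pvAfterColon ln) else pvALoop1 rest
    else pvALoop1 rest

-- second for-loop of A: return on the first refined-query line
def pvALoop2 : List (List Char) → Option (List Char)
  | [] => none
  | ln :: rest =>
    if pvRefPrefix (pvLowC ln) then some (pvAfterColon ln) else pvALoop2 rest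

def extract_refined_question_from_refiner_py (refiner_text : String) : String :=
  let cs := refiner_text.toList
  if (PySem.Chars.strip cs).isEmpty then "" else
  let lines := ((PySem.Chars.splitlines cs).map PySem.Chars.strip).filter (fun l => !l.isEmpty)
  if lines.isEmpty then "" else
  match pvALoop1 lines with
  | some r => String.ofList r
  | none =>
    match pvALoop2 lines with
    | some r => String.ofList r
    | none =>
      let question_candidates := lines.filter (fun l => PySem.Chars.isIn ['?'] l)
      match question_candidates.getLast? with
      | some l => String.ofList (PySem.Chars.strip l)
      | none => ""

-- ===== PORT B =====
-- single pass: strip each raw line, skip empties, keep first improved / first refined / last '?' line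
def pvBStep (st : Option (List Char) × Option (List Char) × Option (List Char)) (raw : List Char) :
    Option (List Char) × Option (List Char) × Option (List Char) :=
  let ln := PySem.Chars.strip raw
  if ln.isEmpty then st else
  let low := pvLowC ln
  let imp := if st.1.isNone && pvImpPrefix low && PySem.Chars.isIn [':'] ln then some ln else st.1
  let ref := if st.2.1.isNone && pvRefPrefix low then some ln else st.2.1
  let q := if PySem.Chars.isIn ['?'] ln then some ln else st.2.2
  (imp, ref, q)

def extract_refined_question_from_refiner_py_alt (refiner_text : String) : String :=
  let cs := refiner_text.toList
  if (PySem.Chars.strip cs).isEmpty then "" else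
  match (PySem.Chars.splitlines cs).foldl pvBStep (none, none, none) with
  | (some ln, _, _) => String.ofList (pvAfterColon ln)
  | (none, some ln, _) => String.ofList (pvAfterColon ln)
  | (none, none, some ln) => String.ofList ln
  | (none, none, none) => ""

-- ===== PRECONDITION & SPEC =====
def Spec_extract_refined_question_from_refiner_py (refiner_text : String) (out : String) : Prop := out = extract_refined_question_from_refiner_py_alt refiner_text
instance (refiner_text : String) (out : String) : Decidable (Spec_extract_refined_question_from_refiner_py refiner_text out) := by unfold Spec_extract_refined_question_from_refiner_py; infer_instance

-- ===== CLAIM (what is proved, stated in full; the proofs are below) =====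
def Claim_equal_extract_refined_question_from_refiner_py : Prop := ∀ (refiner_text : String), Dom_extract_refined_question_from_refiner_py refiner_text → Spec_extract_refined_question_from_refiner_py refiner_text (extract_refined_question_from_refiner_py refiner_text)

-- ===== LEMMAS AND PROOFS =====

-- the three line predicates the proofs speak about
def pvC1 (ln : List Char) : Bool := pvImpPrefix (pvLowC ln) && PySem.Chars.isIn [':'] ln
def pvC2 (ln : List Char) : Bool := pvRefPrefix (pvLowC ln)
def pvHasQ (ln : List Char) : Bool := PySem.Chars.isIn ['?'] ln

theorem pvALoop1_eq (lines : List (List Char)) :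
    pvALoop1 lines = (lines.find? pvC1).map pvAfterColon := by
  induction lines with
  | nil => rfl
  | cons ln rest ih =>
    simp only [pvALoop1, List.find?_cons, pvC1]
    by_cases h1 : pvImpPrefix (pvLowC ln) <;> by_cases h2 : PySem.Chars.isIn [':'] ln <;>
      simp [h1, h2, ih]

theorem pvALoop2_eq (lines : List (List Char)) :
    pvALoop2 lines = (lines.find? pvC2).map pvAfterColon := by
  induction lines with
  | nil => rfl
  | cons ln rest ih =>
    simp only [pvALoop2, List.find?_cons, pvC2]
    by_cases h : pvRefPrefix (pvLowC ln) <;> simp [h, ih]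

-- B's step on the cleaned (stripped, non-empty) line
def pvBStep2 (st : Option (List Char) × Option (List Char) × Option (List Char)) (ln : List Char) :
    Option (List Char) × Option (List Char) × Option (List Char) :=
  ((if st.1.isNone && pvC1 ln then some ln else st.1),
   (if st.2.1.isNone && pvC2 ln then some ln else st.2.1),
   (if pvHasQ ln then some ln else st.2.2))

theorem pvStep_eq_step2 (st) (raw : List Char) :
    pvBStep st raw = if (PySem.Chars.strip raw).isEmpty then st else pvBStep2 st (PySem.Chars.strip raw) := by
  simp only [pvBStep, pvBStep2, pvC1, pvC2, pvHasQ]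
  split <;> simp_all [Bool.and_assoc]

theorem pvFold_transfer (raws : List (List Char)) (st) :
    raws.foldl pvBStep st =
      (((raws.map PySem.Chars.strip).filter (fun l => !l.isEmpty)).foldl pvBStep2 st) := by
  induction raws generalizing st with
  | nil => rfl
  | cons raw rest ih =>
    simp only [List.foldl_cons, List.map_cons, List.filter_cons]
    rw [pvStep_eq_step2]
    by_cases h : (PySem.Chars.strip raw).isEmpty <;> simp [h, ih]

theorem pvFold2_spec (lines : List (List Char)) (i r q : Option (List Char)) :
    lines.foldl pvBStep2 (i, r, q) =
      (i.or (lines.find? pvC1), r.or (lines.find? pvC2),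
       ((lines.filter pvHasQ).getLast?).or q) := by
  induction lines generalizing i r q with
  | nil => simp
  | cons ln rest ih =>
    simp only [List.foldl_cons, List.find?_cons, List.filter_cons, pvBStep2]
    rw [ih]
    congr 1
    · by_cases h : pvC1 ln <;> cases i <;> simp [h]
    congr 1
    · by_cases h : pvC2 ln <;> cases r <;> simp [h]
    · by_cases h : pvHasQ ln <;> simp only [h, if_pos, Bool.false_eq_true, if_false]
      cases hf : rest.filter pvHasQ with
      | nil => simp
      | cons x xs =>
        rw [List.getLast?_cons_cons]
        cases hg : (x :: xs).getLast? with
        | none => simp at hg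
        | some a => simp

-- a prefix of a list that dropWhile leaves unchanged is itself left unchanged
theorem pv_dropWhile_eq_of_prefix (p : Char → Bool) {x y : List Char} (hy : y <+: x)
    (hx : x.dropWhile p = x) : y.dropWhile p = y := by
  cases y with
  | nil => rfl
  | cons c t =>
    obtain ⟨rest, rfl⟩ := hy
    by_cases hc : p c
    · exfalso
      simp only [List.cons_append, List.dropWhile_cons, hc, if_true] at hx
      have hlen := congrArg List.length hx
      rw [List.length_cons] at hlen
      have hle := List.length_dropWhile_le p (t ++ rest)
      omega
    · simp [hc]

theorem pv_rstrip_prefix (x : List Char) : PySem.Chars.rstrip x <+: x := by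
  refine List.reverse_suffix.mp ?_
  simpa [PySem.Chars.rstrip] using List.dropWhile_suffix (l := x.reverse) PySem.Chars.isspace

-- strip is idempotent, so re-stripping an already stripped line changes nothing
theorem pv_strip_idem (s : List Char) :
    PySem.Chars.strip (PySem.Chars.strip s) = PySem.Chars.strip s := by
  simp only [PySem.Chars.strip]
  have hx : PySem.Chars.lstrip (PySem.Chars.lstrip s) = PySem.Chars.lstrip s := by
    simp [PySem.Chars.lstrip, List.dropWhile_idempotent]
  have h1 : PySem.Chars.lstrip (PySem.Chars.rstrip (PySem.Chars.lstrip s)) =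
      PySem.Chars.rstrip (PySem.Chars.lstrip s) :=
    pv_dropWhile_eq_of_prefix PySem.Chars.isspace (pv_rstrip_prefix _) hx
  rw [h1]
  simp [PySem.Chars.rstrip, List.dropWhile_idempotent]

-- every cleaned line is a stripped string, hence fixed by strip
theorem pv_strip_mem_lines (cs : List Char) (l : List Char)
    (hl : l ∈ ((PySem.Chars.splitlines cs).map PySem.Chars.strip).filter (fun l => !l.isEmpty)) :
    PySem.Chars.strip l = l := by
  have := List.mem_of_mem_filter hl
  obtain ⟨raw, _, rfl⟩ := List.mem_map.mp this
  exact pv_strip_idem raw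

-- ===== VERDICT (by name: the statement is the Claim_ definition above) =====
theorem extract_refined_question_from_refiner_py_spec : Claim_equal_extract_refined_question_from_refiner_py := by
  intro t _
  unfold Spec_extract_refined_question_from_refiner_py
  unfold extract_refined_question_from_refiner_py extract_refined_question_from_refiner_py_alt
  by_cases hs : (PySem.Chars.strip t.toList).isEmpty
  · simp [hs]
  · simp only [hs, Bool.false_eq_true, if_false]
    rw [pvFold_transfer, pvFold2_spec]
    simp only [Option.none_or, Option.or_none]
    set lines := ((PySem.Chars.splitlines t.toList).map PySem.Chars.strip).filter
      (fun l => !l.isEmpty) with hlines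
    by_cases hemp : lines.isEmpty
    · rw [List.isEmpty_iff] at hemp
      simp [hemp]
    · simp only [hemp, Bool.false_eq_true, if_false]
      rw [pvALoop1_eq, pvALoop2_eq]
      cases h1 : lines.find? pvC1 with
      | some ln => simp
      | none =>
        cases h2 : lines.find? pvC2 with
        | some ln => simp
        | none =>
          simp only [Option.map_none]
          have hfq : lines.filter (fun l => PySem.Chars.isIn ['?'] l) = lines.filter pvHasQ := rfl
          rw [hfq]
          cases hl : (lines.filter pvHasQ).getLast? with
          | none => simp
          | some l =>
            have hmem : l ∈ lines.filter pvHasQ := List.mem_of_getLast? hl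
            have := pv_strip_mem_lines t.toList l (hlines ▸ List.mem_of_mem_filter hmem)
            simp [this]
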